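-- pv_equiv track=rewrite | github.com/alexandraback/datacollection | solutions_5738606668808192_1/Python/hwmaltby/coin_jam.py | mknum
-- ===== SOURCE A (Python) =====
-- def mknum(l, ones):
--     """
--     Returns a jamcoin of length l and ones at spots indicated.
--     """
--     s = ""
--     for i in range(1, l+1):
--         if i in ones:
--             s = "1" + s
--         else:
--             s = "0" + s
--     return s
-- ===== SOURCE B (Python) =====
-- def mknum(l, ones):
--     """
--     Returns a jamcoin of length l and ones at spots indicated.
--     """
--     n = max(l, 0)
--     chars = ["0"] * n
--     for i in ones:
--         if 1 <= i <= n: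
--             chars[n - i] = "1"
--     return "".join(chars)
-- ===== Notes on version B (the rewrite author's own statement) =====
-- stated objective: faster
-- what changed: Instead of scanning every index 1..l and testing membership in ones (O(l*|ones|)), B allocates a list of l '0' chars and scatters a '1' write at position l-i for each in-range element of ones, then joins once (O(l+|ones|)).
import Mathlib
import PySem

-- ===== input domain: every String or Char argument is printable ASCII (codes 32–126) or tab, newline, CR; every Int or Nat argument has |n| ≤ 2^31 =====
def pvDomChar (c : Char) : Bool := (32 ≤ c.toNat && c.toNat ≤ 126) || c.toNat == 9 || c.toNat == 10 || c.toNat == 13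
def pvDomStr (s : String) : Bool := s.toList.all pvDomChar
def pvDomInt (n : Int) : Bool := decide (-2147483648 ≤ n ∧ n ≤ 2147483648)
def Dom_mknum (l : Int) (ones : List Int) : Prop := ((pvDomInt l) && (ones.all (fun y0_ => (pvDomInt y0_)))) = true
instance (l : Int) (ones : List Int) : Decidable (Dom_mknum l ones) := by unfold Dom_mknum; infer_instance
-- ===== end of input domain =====

-- B replaces the per-index membership scan with one scatter pass over `ones`; measured objective: faster.
-- ===== PORT A =====
-- strings are carried as List Char (s = "1" + s  ↦  '1' :: cs) and wrapped with String.mk at the end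
def mknum (l : Int) (ones : List Int) : String :=
  String.mk ((PySem.List.pyRange 1 (l+1) 1).foldl
    (fun s i => (if i ∈ ones then '1' else '0') :: s) [])

-- ===== PORT B =====
def mknum_alt (l : Int) (ones : List Int) : String :=
  let n : Int := max l 0
  let chars : List Char := List.replicate n.toNat '0'
  String.mk (ones.foldl
    (fun cs i => if 1 ≤ i ∧ i ≤ n then cs.set (n - i).toNat '1' else cs) chars)

-- ===== PRECONDITION & SPEC =====
def Spec_mknum (l : Int) (ones : List Int) (out : String) : Prop := out = mknum_alt l ones
instance (l : Int) (ones : List Int) (out : String) : Decidable (Spec_mknum l ones out) := by unfold Spec_mknum; infer_instance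

-- ===== CLAIM (what is proved, stated in full; the proofs are below) =====
def Claim_equal_mknum : Prop := ∀ (l : Int) (ones : List Int), Dom_mknum l ones → Spec_mknum l ones (mknum l ones)

-- ===== LEMMAS AND PROOFS =====

-- ===== VERDICT (by name: the statement is the Claim_ definition above) =====
-- A's loop: prepending f i for each i builds (map f).reverse
theorem foldl_cons_map (f : Int → Char) :
    ∀ (xs : List Int) (acc : List Char),
      xs.foldl (fun s i => f i :: s) acc = (xs.map f).reverse ++ acc := by
  intro xs
  induction xs with
  | nil => intro acc; simp
  | cons x xs ih => intro acc; simp [List.foldl_cons, ih]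

-- B's loop: length is preserved
theorem scatter_length (n : Int) (ones : List Int) :
    ∀ (cs : List Char),
      (ones.foldl (fun cs i => if 1 ≤ i ∧ i ≤ n then cs.set (n - i).toNat '1' else cs) cs).length
        = cs.length := by
  induction ones with
  | nil => intro cs; simp
  | cons o os ih =>
    intro cs
    simp only [List.foldl_cons]
    rw [ih]
    split_ifs <;> simp

-- B's loop: the element at index j after the scatter pass
theorem scatter_get (n : Int) (ones : List Int) :
    ∀ (cs : List Char) (j : Nat), cs.length = n.toNat → (hj : j < cs.length) →
      (ones.foldl (fun cs i => if 1 ≤ i ∧ i ≤ n then cs.set (n - i).toNat '1' else cs) cs)[j]'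
          (by rw [scatter_length]; exact hj)
        = if (n - (j : Int)) ∈ ones then '1' else cs[j]'hj := by
  induction ones with
  | nil => intro cs j _ hj; simp
  | cons o os ih =>
    intro cs j hlen hj
    simp only [List.foldl_cons]
    by_cases ho : 1 ≤ o ∧ o ≤ n
    · simp only [if_pos ho]
      have hlen' : (cs.set (n - o).toNat '1').length = n.toNat := by simp [hlen]
      rw [ih (cs.set (n - o).toNat '1') j hlen' (by simpa using hj)]
      by_cases hmem : (n - (j : Int)) ∈ os
      · simp [hmem]
      · rw [if_neg hmem]
        by_cases heq : o = n - (j : Int)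
        · have hji : ((n - o).toNat : Int) = n - o := by omega
          have hjj : (n - o).toNat = j := by omega
          have : n - (j : Int) ∈ o :: os := by simp [heq]
          rw [if_pos this, hjj]
          exact List.getElem_set_self _
        · have hne : (n - o).toNat ≠ j := by omega
          rw [List.getElem_set_ne hne]
          have : ¬ (n - (j : Int)) ∈ o :: os := by
            simp only [List.mem_cons, not_or]
            exact ⟨fun h => heq h.symm, hmem⟩
          rw [if_neg this]
    · simp only [if_neg ho]
      rw [ih cs j hlen hj]
      have hjn : (j : Int) < n := by omega
      by_cases heq : o = n - (j : Int)
      · exact absurd (⟨by omega, by omega⟩ : 1 ≤ o ∧ o ≤ n) ho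
      · by_cases hmem : (n - (j : Int)) ∈ os
        · simp [hmem]
        · have h1 : ¬ (n - (j : Int)) ∈ o :: os := by
            simp only [List.mem_cons, not_or]
            exact ⟨fun h => heq h.symm, hmem⟩
          rw [if_neg h1, if_neg hmem]

-- ===== VERDICT (by name: the statement is the Claim_ definition above) =====
theorem mknum_spec : Claim_equal_mknum := by
  intro l ones _
  unfold Spec_mknum mknum mknum_alt
  apply congrArg String.mk
  set n : Int := max l 0 with hn
  have hln : (l + 1 - 1).toNat = n.toNat := by omega
  rw [foldl_cons_map, List.append_nil, PySem.List.pyRange_one, hln]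
  apply List.ext_getElem
  · rw [scatter_length]; simp
  · intro j h1 h2
    have hjn : j < n.toNat := by
      simpa [scatter_length] using h2
    have hrep : j < (List.replicate n.toNat '0').length := by simpa using hjn
    rw [scatter_get n ones _ j (by simp) hrep]
    have hlm : j < ((List.range n.toNat).map fun k => 1 + (k : Int)).length := by simpa using hjn
    rw [List.getElem_reverse]
    simp only [List.getElem_map, List.getElem_range, List.getElem_replicate]
    simp only [List.length_map, List.length_range] at h1 ⊢
    have harg : 1 + ((n.toNat - 1 - j : Nat) : Int) = n - (j : Int) := by omega
    rw [harg]
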